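-- pv_equiv track=rewrite | github.com/dinossht/sfm_example_vo | utils.py | return_unique_mask
-- ===== SOURCE A (Python) =====
-- def return_unique_mask(arr):
--     remove_idx = []
--     unique_idx = []
--     for i,el in enumerate(arr):
--         if el in arr[i+1:]:
--             remove_idx.append(i)
--         else:
--             unique_idx.append(i)
--     return unique_idx
-- ===== SOURCE B (Python) =====
-- def return_unique_mask(arr):
--     remaining = {}
--     for el in arr:
--         remaining[el] = remaining.get(el, 0) + 1
--     unique_idx = []
--     for i, el in enumerate(arr):
--         remaining[el] -= 1
--         if remaining[el] == 0:
--             unique_idx.append(i)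
--     return unique_idx
-- ===== Notes on version B (the rewrite author's own statement) =====
-- stated objective: faster
-- what changed: Replaces A's per-element membership scan of the suffix arr[i+1:] with a counting dict built in a first pass and decremented in a second forward pass: an index is emitted exactly when its value's remaining count drops to zero, i.e. it is the last occurrence.
import Mathlib
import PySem

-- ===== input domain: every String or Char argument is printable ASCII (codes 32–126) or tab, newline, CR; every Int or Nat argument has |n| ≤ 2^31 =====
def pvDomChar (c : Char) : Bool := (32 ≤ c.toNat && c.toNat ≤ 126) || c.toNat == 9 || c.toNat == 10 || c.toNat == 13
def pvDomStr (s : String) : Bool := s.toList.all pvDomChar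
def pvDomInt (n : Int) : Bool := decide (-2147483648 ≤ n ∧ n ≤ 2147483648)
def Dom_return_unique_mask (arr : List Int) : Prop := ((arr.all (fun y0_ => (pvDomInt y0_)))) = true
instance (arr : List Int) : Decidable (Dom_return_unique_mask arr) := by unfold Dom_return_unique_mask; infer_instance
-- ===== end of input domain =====

-- B replaces A's per-element suffix membership scan by a counting dict built in one pass and
-- decremented in a second forward pass (objective: faster).


-- ===== PORT A =====
def return_unique_mask (arr : List Int) : List Int :=
  ((PySem.List.enumerate arr 0).foldl
      (fun (st : List Int × List Int) (p : Int × Int) =>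
        if p.2 ∈ PySem.List.slice arr (some (p.1 + 1)) none then (st.1 ++ [p.1], st.2)
        else (st.1, st.2 ++ [p.1]))
      ([], [])).2

-- ===== PORT B =====
-- 'remaining[el] -= 1' reads then overwrites the key (always present, since the first pass
-- inserted every element of arr); ported with Dict.getD/Dict.insert.
def return_unique_mask_alt (arr : List Int) : List Int :=
  let remaining := arr.foldl
      (fun (d : PySem.Dict Int Int) el => PySem.Dict.insert d el (PySem.Dict.getD d el 0 + 1))
      PySem.Dict.empty
  ((PySem.List.enumerate arr 0).foldl
      (fun (st : PySem.Dict Int Int × List Int) (p : Int × Int) =>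
        let d := PySem.Dict.insert st.1 p.2 (PySem.Dict.getD st.1 p.2 0 - 1)
        if PySem.Dict.getD d p.2 0 == 0 then (d, st.2 ++ [p.1]) else (d, st.2))
      (remaining, [])).2

-- ===== PRECONDITION & SPEC =====
def Spec_return_unique_mask (arr : List Int) (out : List Int) : Prop := out = return_unique_mask_alt arr
instance (arr : List Int) (out : List Int) : Decidable (Spec_return_unique_mask arr out) := by unfold Spec_return_unique_mask; infer_instance

-- ===== CLAIM (what is proved, stated in full; the proofs are below) =====
def Claim_equal_return_unique_mask : Prop := ∀ (arr : List Int), Dom_return_unique_mask arr → Spec_return_unique_mask arr (return_unique_mask arr)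

-- ===== LEMMAS AND PROOFS =====

-- A's loop: the unique_idx component of the pair-state fold is an append-filter.
theorem aFold_snd (arr : List Int) (l : List (Int × Int)) (r u : List Int) :
    (l.foldl
        (fun (st : List Int × List Int) (p : Int × Int) =>
          if p.2 ∈ PySem.List.slice arr (some (p.1 + 1)) none then (st.1 ++ [p.1], st.2)
          else (st.1, st.2 ++ [p.1]))
        (r, u)).2
      = u ++ (l.filter
          (fun p => !decide (p.2 ∈ PySem.List.slice arr (some (p.1 + 1)) none))).map (·.1) := by
  induction l generalizing r u with
  | nil => simp
  | cons p l ih =>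
    by_cases h : p.2 ∈ PySem.List.slice arr (some (p.1 + 1)) none <;>
      simp [h, ih]

-- the common shape of both results: indices whose value does not recur later
def keepLast (l : List (Int × Int)) : List Int :=
  match l with
  | [] => []
  | p :: rest => if p.2 ∈ rest.map (·.2) then keepLast rest else p.1 :: keepLast rest

-- B's second fold under the counting invariant: the emitted indices are exactly keepLast.
theorem bFold_snd (l : List (Int × Int)) (d : PySem.Dict Int Int) (acc : List Int)
    (H : ∀ v : Int, PySem.Dict.getD d v 0 = ((l.map (·.2)).count v : Int)) :
    (l.foldl
        (fun (st : PySem.Dict Int Int × List Int) (p : Int × Int) =>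
          let d := PySem.Dict.insert st.1 p.2 (PySem.Dict.getD st.1 p.2 0 - 1)
          if PySem.Dict.getD d p.2 0 == 0 then (d, st.2 ++ [p.1]) else (d, st.2))
        (d, acc)).2
      = acc ++ keepLast l := by
  induction l generalizing d acc with
  | nil => simp [keepLast]
  | cons p rest ih =>
    have hd' : ∀ v : Int,
        PySem.Dict.getD (PySem.Dict.insert d p.2 (PySem.Dict.getD d p.2 0 - 1)) v 0
          = ((rest.map (·.2)).count v : Int) := by
      intro v
      rw [PySem.Dict.getD_insert]
      by_cases hv : v = p.2
      · rw [if_pos hv, hv, H p.2]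
        simp
      · rw [if_neg hv, H v]
        congr 1
        simp [List.count_cons]
        exact fun h => hv h.symm
    have hcond : (PySem.Dict.getD (PySem.Dict.insert d p.2 (PySem.Dict.getD d p.2 0 - 1)) p.2 0 == 0)
        = !decide (p.2 ∈ rest.map (·.2)) := by
      rw [hd' p.2]
      by_cases hm : p.2 ∈ rest.map (·.2)
      · have : (rest.map (·.2)).count p.2 ≠ 0 := by
          simpa [List.count_eq_zero] using hm
        simp [hm]
        omega
      · simp [hm, List.count_eq_zero.mpr hm]
    rw [List.foldl_cons]
    have hstep : (let d1 := PySem.Dict.insert (d, acc).1 p.2 (PySem.Dict.getD (d, acc).1 p.2 0 - 1);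
        if PySem.Dict.getD d1 p.2 0 == 0 then (d1, (d, acc).2 ++ [p.1]) else (d1, (d, acc).2))
        = (PySem.Dict.insert d p.2 (PySem.Dict.getD d p.2 0 - 1),
           if p.2 ∈ rest.map (·.2) then acc else acc ++ [p.1]) := by
      show (if PySem.Dict.getD (PySem.Dict.insert d p.2 (PySem.Dict.getD d p.2 0 - 1)) p.2 0 == 0
          then (PySem.Dict.insert d p.2 (PySem.Dict.getD d p.2 0 - 1), acc ++ [p.1])
          else (PySem.Dict.insert d p.2 (PySem.Dict.getD d p.2 0 - 1), acc)) = _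
      rw [hcond]
      by_cases hm : p.2 ∈ rest.map (·.2) <;> simp [hm]
    rw [hstep]
    by_cases hm : p.2 ∈ rest.map (·.2)
    · rw [if_pos hm, ih _ _ hd']
      simp [keepLast, hm]
    · rw [if_neg hm, ih _ _ hd']
      simp [keepLast, hm]

-- A's filter equals keepLast, given the condition matches "value recurs later" positionally.
theorem filter_eq_keepLast (l : List (Int × Int)) (cond : Int × Int → Bool)
    (h : ∀ (k : Nat) (hk : k < l.length),
        cond l[k] = decide (l[k].2 ∈ (l.drop (k + 1)).map (·.2))) :
    (l.filter (fun p => !cond p)).map (·.1) = keepLast l := by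
  induction l with
  | nil => simp [keepLast]
  | cons p l ih =>
    have h0 := h 0 (by simp)
    simp only [List.getElem_cons_zero, List.drop_succ_cons, List.drop_zero] at h0
    have htail : ∀ (k : Nat) (hk : k < l.length),
        cond l[k] = decide (l[k].2 ∈ (l.drop (k + 1)).map (·.2)) := by
      intro k hk
      have := h (k + 1) (by simpa using Nat.succ_lt_succ hk)
      simpa using this
    by_cases hc : p.2 ∈ l.map (·.2)
    · rw [List.filter_cons]
      simp only [h0]
      simp [keepLast, hc, ih htail]
    · rw [List.filter_cons]
      simp only [h0]
      simp [keepLast, hc, ih htail]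

-- the positional condition holds for A's slice test on 'enumerate arr 0'
theorem cond_enumerate (arr : List Int) (k : Nat) (hk : k < (PySem.List.enumerate arr 0).length) :
    (decide ((PySem.List.enumerate arr 0)[k].2
        ∈ PySem.List.slice arr (some ((PySem.List.enumerate arr 0)[k].1 + 1)) none))
      = decide ((PySem.List.enumerate arr 0)[k].2
        ∈ ((PySem.List.enumerate arr 0).drop (k + 1)).map (·.2)) := by
  have hget := PySem.List.getElem_enumerate (xs := arr) (s := 0) (k := k) (by simpa using hk)
  have hcast : ((PySem.List.enumerate arr 0)[k].1 + 1) = ((k + 1 : Nat) : Int) := by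
    rw [hget]; push_cast; ring
  have hslice : PySem.List.slice arr (some ((PySem.List.enumerate arr 0)[k].1 + 1)) none
      = arr.drop (k + 1) := by
    rw [hcast, PySem.List.slice_from_natCast]
  have hmap : ((PySem.List.enumerate arr 0).drop (k + 1)).map (·.2) = arr.drop (k + 1) := by
    rw [List.map_drop, PySem.List.map_snd_enumerate]
  rw [hslice, hmap]

-- ===== VERDICT (by name: the statement is the Claim_ definition above) =====
theorem return_unique_mask_spec : Claim_equal_return_unique_mask := by
  intro arr _
  unfold Spec_return_unique_mask return_unique_mask return_unique_mask_alt
  rw [aFold_snd, List.nil_append,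
    filter_eq_keepLast (PySem.List.enumerate arr 0)
      (fun p => decide (p.2 ∈ PySem.List.slice arr (some (p.1 + 1)) none)) (cond_enumerate arr)]
  have Hinit : ∀ v : Int,
      PySem.Dict.getD
        (arr.foldl
          (fun (d : PySem.Dict Int Int) el => PySem.Dict.insert d el (PySem.Dict.getD d el 0 + 1))
          PySem.Dict.empty) v 0
        = (((PySem.List.enumerate arr 0).map (·.2)).count v : Int) := by
    intro v
    rw [PySem.Dict.getD_foldl_insert_add_one, PySem.List.map_snd_enumerate]
    simp [PySem.Dict.getD_empty]
  have := bFold_snd (PySem.List.enumerate arr 0) _ [] Hinit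
  simp only [List.nil_append] at this
  exact this.symm
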